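-- pv_equiv track=rewrite | github.com/shashankskagnihotri/benchmarking_robustness | optical_flow_estimation/attacks/attack_utils/attack_args_parser.py | flatten_and_combine
-- ===== SOURCE A (Python) =====
-- import itertools
--
-- def flatten_and_combine(lists):
--     if len(lists) == 1:
--         return lists[0]
--     else:
--         # Generate all combinations from sublists first
--         rest_combined = list(itertools.product(*lists[1:]))
--         result = []
--         for item in lists[0]:
--             for combo in rest_combined:
--                 result.extend([item] + list(combo))
--         return result
-- ===== SOURCE B (Python) =====
-- def flatten_and_combine(lists):
--     if len(lists) == 1:
--         return lists[0]
--     # Decode each combination directly from its index by mixed-radix divmod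
--     # (no intermediate product of tuples is ever materialized).
--     total = 1
--     for lst in lists:
--         total *= len(lst)
--     result = []
--     for idx in range(total):
--         rem = idx
--         combo = []
--         for lst in reversed(lists):
--             rem, pos = divmod(rem, len(lst))
--             combo = [lst[pos]] + combo
--         result.extend(combo)
--     return result
-- ===== Notes on version B (the rewrite author's own statement) =====
-- stated objective: alternative
-- what changed: B decodes the k-th combination directly from its index by mixed-radix divmod over the list lengths, never materializing the Cartesian product of the tail that A builds with itertools.product.
import Mathlib
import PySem

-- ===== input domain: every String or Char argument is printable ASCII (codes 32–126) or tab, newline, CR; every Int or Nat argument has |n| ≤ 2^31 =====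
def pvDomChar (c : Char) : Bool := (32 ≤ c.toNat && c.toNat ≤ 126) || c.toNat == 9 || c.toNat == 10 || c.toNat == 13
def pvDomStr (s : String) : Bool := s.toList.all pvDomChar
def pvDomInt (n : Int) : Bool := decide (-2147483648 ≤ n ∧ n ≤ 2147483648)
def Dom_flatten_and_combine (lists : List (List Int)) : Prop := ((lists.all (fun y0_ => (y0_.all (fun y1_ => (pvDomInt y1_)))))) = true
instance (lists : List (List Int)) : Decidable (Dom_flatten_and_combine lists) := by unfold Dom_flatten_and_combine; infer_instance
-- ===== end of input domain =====

-- B decodes each combination directly from its index by mixed-radix divmod instead of materializing the Cartesian product of the tail with itertools.product; return-value equivalence only.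


-- ===== PORT A =====
-- itertools.product(*ls): all combinations, leftmost list varying slowest
def pyProduct : List (List Int) → List (List Int)
  | [] => [[]]
  | l :: ls => l.flatMap (fun x => (pyProduct ls).map (fun c => x :: c))

def flatten_and_combine (lists : List (List Int)) : List Int :=
  match lists with
  | [] => []      -- Python raises IndexError here (lists[0]); excluded by Pre_
  | [l] => l
  | l :: ls =>
    let rest_combined := pyProduct ls
    l.foldl (fun result item =>
      rest_combined.foldl (fun result combo => result ++ (item :: combo)) result) []

-- ===== PORT B =====
def flatten_and_combine_alt (lists : List (List Int)) : List Int :=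
  if lists.length = 1 then lists.headD [] else
  let total := lists.foldl (fun t lst => t * (lst.length : Int)) 1
  (PySem.List.pyRange 0 total 1).foldl (fun result idx =>
    let st := lists.reverse.foldl (fun (st : Int × List Int) lst =>
      (PySem.Int.floordiv st.1 (lst.length : Int),
       PySem.List.pyGetD lst (PySem.Int.mod st.1 (lst.length : Int)) 0 :: st.2))
      (idx, ([] : List Int))
    result ++ st.2) []

-- ===== PRECONDITION & SPEC =====
-- A raises IndexError (lists[0]) on the empty outer list; Pre_ excludes exactly that.
def Pre_flatten_and_combine (lists : List (List Int)) : Prop := lists ≠ []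
instance (lists : List (List Int)) : Decidable (Pre_flatten_and_combine lists) := by unfold Pre_flatten_and_combine; infer_instance
def pvWitness_flatten_and_combine : List (List Int) := [[1, 2], [3, 4]]
def Spec_flatten_and_combine (lists : List (List Int)) (out : List Int) : Prop := out = flatten_and_combine_alt lists
instance (lists : List (List Int)) (out : List Int) : Decidable (Spec_flatten_and_combine lists out) := by unfold Spec_flatten_and_combine; infer_instance

-- ===== CLAIM (what is proved, stated in full; the proofs are below) =====
def Claim_equal_flatten_and_combine : Prop := ∀ (lists : List (List Int)), Dom_flatten_and_combine lists → Pre_flatten_and_combine lists → Spec_flatten_and_combine lists (flatten_and_combine lists)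

-- ===== LEMMAS AND PROOFS =====

-- product of the lengths, as B's running total computes it
def prodL (ls : List (List Int)) : Int := (ls.map (fun l => (l.length : Int))).prod

theorem prodL_cons (l : List Int) (ls : List (List Int)) :
    prodL (l :: ls) = (l.length : Int) * prodL ls := by
  simp [prodL, List.prod_cons]

theorem foldl_prodL (ls : List (List Int)) (c : Int) :
    ls.foldl (fun t lst => t * (lst.length : Int)) c = c * prodL ls := by
  induction ls generalizing c with
  | nil => simp [prodL]
  | cons l ls ih => simp only [List.foldl_cons, ih, prodL_cons]; ring

theorem prodL_nonneg (ls : List (List Int)) : 0 ≤ prodL ls := by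
  induction ls with
  | nil => simp [prodL]
  | cons l ls ih => rw [prodL_cons]; exact mul_nonneg (Int.natCast_nonneg _) ih

-- floor division composes for nonnegative divisors (incl. 0, where fdiv _ 0 = 0)
theorem fdiv_fdiv (a m n : Int) (hm : 0 ≤ m) (hn : 0 ≤ n) :
    PySem.Int.floordiv (PySem.Int.floordiv a m) n = PySem.Int.floordiv a (m * n) := by
  rcases eq_or_lt_of_le hm with hm0 | hm0
  · simp [PySem.Int.floordiv, ← hm0, Int.fdiv_zero, Int.zero_fdiv]
  rcases eq_or_lt_of_le hn with hn0 | hn0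
  · simp [PySem.Int.floordiv, ← hn0, Int.fdiv_zero]
  rw [PySem.Int.floordiv_eq_ediv_of_pos hm0, PySem.Int.floordiv_eq_ediv_of_pos hn0,
    PySem.Int.floordiv_eq_ediv_of_pos (mul_pos hm0 hn0)]
  exact Int.ediv_ediv_of_nonneg hm

-- the combination B's inner loop decodes for a given index
def comboOf : List (List Int) → Int → List Int
  | [], _ => []
  | l :: ls, r =>
    PySem.List.pyGetD l (PySem.Int.mod (PySem.Int.floordiv r (prodL ls)) (l.length : Int)) 0
      :: comboOf ls r

theorem fold_rev (ls : List (List Int)) (r : Int) (acc : List Int) :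
    ls.reverse.foldl (fun (st : Int × List Int) lst =>
      (PySem.Int.floordiv st.1 (lst.length : Int),
       PySem.List.pyGetD lst (PySem.Int.mod st.1 (lst.length : Int)) 0 :: st.2)) (r, acc)
      = (PySem.Int.floordiv r (prodL ls), comboOf ls r ++ acc) := by
  induction ls generalizing r acc with
  | nil => simp [prodL, comboOf, PySem.Int.floordiv, Int.fdiv_one]
  | cons l ls ih =>
    simp only [List.reverse_cons, List.foldl_append, ih, List.foldl_cons, List.foldl_nil, comboOf]
    refine Prod.ext ?_ rfl
    simpa [prodL_cons, mul_comm] using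
      fdiv_fdiv r (prodL ls) (l.length : Int) (prodL_nonneg ls) (Int.natCast_nonneg _)

-- decoded combinations are periodic in the index with period prodL ls
theorem comboOf_add (ls : List (List Int)) (q r : Int) :
    comboOf ls (q * prodL ls + r) = comboOf ls r := by
  induction ls generalizing q with
  | nil => simp [comboOf]
  | cons l ls ih =>
    rcases eq_or_lt_of_le (prodL_nonneg ls) with h0 | hpos
    · have hz : prodL (l :: ls) = 0 := by rw [prodL_cons, ← h0, mul_zero]
      simp [hz]
    · rw [prodL_cons]
      simp only [comboOf]
      congr 1
      · have e : q * ((l.length : Int) * prodL ls) + r = r + q * (l.length : Int) * prodL ls := by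
          ring
        rw [e, PySem.Int.floordiv_eq_ediv_of_pos hpos, PySem.Int.floordiv_eq_ediv_of_pos hpos,
          Int.add_mul_ediv_right _ _ (ne_of_gt hpos)]
        rcases Nat.eq_zero_or_pos l.length with hl | hl
        · simp [hl]
        have hlp : (0:Int) < (l.length : Int) := by exact_mod_cast hl
        rw [PySem.Int.mod_eq_emod_of_pos hlp, PySem.Int.mod_eq_emod_of_pos hlp,
          mul_comm q ((l.length : Int)), Int.add_mul_emod_self_left]
      · have e2 : q * ((l.length : Int) * prodL ls) + r = (q * (l.length : Int)) * prodL ls + r := by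
          ring
        rw [e2, ih]

theorem length_pyProduct (ls : List (List Int)) :
    ((pyProduct ls).length : Int) = prodL ls := by
  induction ls with
  | nil => simp [pyProduct, prodL]
  | cons l ls ih =>
    have h : (pyProduct (l :: ls)).length = l.length * (pyProduct ls).length := by
      simp [pyProduct, List.length_flatMap, List.map_const', List.sum_replicate, smul_eq_mul]
    rw [prodL_cons, ← ih, h]; push_cast; ring

-- range(0, s*N) splits into s consecutive blocks of length N
theorem range_split (N : Int) (hN : 0 ≤ N) (s : Nat) :
    PySem.List.pyRange 0 ((s : Int) * N) 1
      = (PySem.List.pyRange 0 (s : Int) 1).flatMap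
          (fun q => (PySem.List.pyRange 0 N 1).map (fun r => q * N + r)) := by
  induction s with
  | zero => simp [PySem.List.pyRange_one_eq_nil]
  | succ s ihs =>
    have h2 : (0:Int) ≤ (s : Int) * N := mul_nonneg (Int.natCast_nonneg _) hN
    have h1 : ((s+1 : Nat) : Int) * N = (s : Int) * N + N := by push_cast; ring
    have hc : ((s+1 : Nat) : Int) = (s : Int) + 1 := by push_cast; ring
    rw [h1, PySem.List.pyRange_one_append 0 ((s : Int) * N) ((s : Int) * N + N) h2 (by linarith),
      ihs, hc, PySem.List.pyRange_one_succ_right (Int.natCast_nonneg s), List.flatMap_append]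
    congr 1
    simp only [List.flatMap_cons, List.flatMap_nil, List.append_nil]
    rw [PySem.List.pyRange_one ((s : Int) * N) ((s : Int) * N + N), PySem.List.pyRange_one 0 N]
    simp [List.map_map, Function.comp_def]

-- B's index decoding enumerates exactly the Cartesian product, in product order
theorem map_comboOf_range (ls : List (List Int)) :
    (PySem.List.pyRange 0 (prodL ls) 1).map (comboOf ls) = pyProduct ls := by
  induction ls with
  | nil => decide
  | cons l ls ih =>
    have hN := prodL_nonneg ls
    rcases eq_or_lt_of_le hN with h0 | hpos
    · have hz : prodL (l :: ls) = 0 := by rw [prodL_cons, ← h0, mul_zero]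
      have hPnil : pyProduct ls = [] := by
        have hl := length_pyProduct ls
        rw [← h0] at hl
        exact List.eq_nil_of_length_eq_zero (by exact_mod_cast hl)
      simp [hz, pyProduct, hPnil, PySem.List.pyRange_one_eq_nil (le_of_eq rfl)]
    · rw [prodL_cons, range_split (prodL ls) hN l.length, List.map_flatMap]
      have hstep : ∀ q ∈ PySem.List.pyRange 0 (l.length : Int) 1,
          ((PySem.List.pyRange 0 (prodL ls) 1).map (fun r => q * prodL ls + r)).map
              (comboOf (l :: ls))
            = (pyProduct ls).map (fun c => PySem.List.pyGetD l q 0 :: c) := by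
        intro q hq
        rw [PySem.List.mem_pyRange_one] at hq
        rw [List.map_map, ← ih, List.map_map]
        apply List.map_congr_left
        intro r hr
        rw [PySem.List.mem_pyRange_one] at hr
        simp only [Function.comp_def, comboOf, comboOf_add]
        congr 2
        have hdiv : PySem.Int.floordiv (q * prodL ls + r) (prodL ls) = q := by
          rw [PySem.Int.floordiv_eq_ediv_of_pos hpos, add_comm,
            Int.add_mul_ediv_right _ _ (ne_of_gt hpos),
            Int.ediv_eq_zero_of_lt hr.1 hr.2, zero_add]
        rw [hdiv]
        rcases Nat.eq_zero_or_pos l.length with hl | hl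
        · omega
        have hlp : (0:Int) < (l.length : Int) := by exact_mod_cast hl
        rw [PySem.Int.mod_eq_emod_of_pos hlp, Int.emod_eq_of_lt hq.1 hq.2]
      rw [List.flatMap_congr hstep]
      have hgetD : (PySem.List.pyRange 0 (l.length : Int) 1).map
          (fun j => PySem.List.pyGetD l j 0) = l := by simp [pysem]
      conv_rhs => rw [pyProduct, ← hgetD]
      rw [List.flatMap_map]

-- A computes the flattened Cartesian product when there are at least two lists
theorem flatten_map_flatten {α β : Type} (g : α → List (List β)) (l : List α) :
    (l.map (fun i => (g i).flatten)).flatten = (l.map g).flatten.flatten := by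
  induction l with
  | nil => simp
  | cons a as ih => simp [ih]

theorem A_eq_flatten_prod (l l1 : List Int) (ls : List (List Int)) :
    flatten_and_combine (l :: l1 :: ls) = (pyProduct (l :: l1 :: ls)).flatten := by
  simp only [flatten_and_combine]
  have hA : ∀ (acc : List Int),
      l.foldl (fun result item =>
        (pyProduct (l1 :: ls)).foldl (fun result combo => result ++ (item :: combo)) result) acc
        = acc ++ l.flatMap (fun item => (pyProduct (l1 :: ls)).flatMap (fun c => item :: c)) := by
    intro acc
    induction l generalizing acc with
    | nil => simp
    | cons x xs ihx =>
      simp only [List.foldl_cons, ihx]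
      rw [PySem.List.foldl_append_eq_flatMap]
      simp [List.append_assoc]
  rw [hA]
  simp only [pyProduct, List.flatMap_def, List.nil_append]
  simp [flatten_map_flatten]

-- B computes the same flattened product via its divmod decoding
theorem B_eq_flatten_prod (lists : List (List Int)) (h : lists.length ≠ 1) :
    flatten_and_combine_alt lists = (pyProduct lists).flatten := by
  simp only [flatten_and_combine_alt, if_neg h]
  simp only [fold_rev, List.append_nil, foldl_prodL, one_mul]
  rw [PySem.List.foldl_append_eq_flatMap]
  simp [List.flatMap_def, map_comboOf_range]

-- ===== VERDICT (by name: the statement is the Claim_ definition above) =====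
theorem flatten_and_combine_spec : Claim_equal_flatten_and_combine := by
  intro lists _ hpre
  unfold Spec_flatten_and_combine
  match lists with
  | [] => exact absurd rfl hpre
  | [l] => simp [flatten_and_combine, flatten_and_combine_alt]
  | l :: l1 :: ls =>
    rw [A_eq_flatten_prod, B_eq_flatten_prod _ (by simp)]
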